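-- pv_equiv track=rewrite | github.com/lukaszliniewicz/catlabel | timiniprint/protocol/encoding.py | encode_run
-- ===== SOURCE A (Python) =====
-- from typing import List
--
-- def encode_run(color: int, count: int) -> List[int]:
--     """Encode a single RLE run for 1-bit data."""
--     out = []
--     while count > 127:
--         out.append((color << 7) | 127)
--         count -= 127
--     if count > 0:
--         out.append((color << 7) | count)
--     return out
-- ===== SOURCE B (Python) =====
-- from typing import List
--
-- def encode_run(color: int, count: int) -> List[int]:
--     """Encode a single RLE run for 1-bit data (closed form, no loop)."""
--     if count <= 0:
--         return []
--     q, r = divmod(count, 127)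
--     full = (color << 7) | 127
--     out = [full] * q
--     if r > 0:
--         out.append((color << 7) | r)
--     return out
-- ===== Notes on version B (the rewrite author's own statement) =====
-- stated objective: simpler
-- what changed: Replaces the subtract-127-per-iteration while-loop with a closed form: divmod(count, 127) gives the number of full chunks and the remainder, and the list is built by list multiplication plus one conditional append.
import Mathlib
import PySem

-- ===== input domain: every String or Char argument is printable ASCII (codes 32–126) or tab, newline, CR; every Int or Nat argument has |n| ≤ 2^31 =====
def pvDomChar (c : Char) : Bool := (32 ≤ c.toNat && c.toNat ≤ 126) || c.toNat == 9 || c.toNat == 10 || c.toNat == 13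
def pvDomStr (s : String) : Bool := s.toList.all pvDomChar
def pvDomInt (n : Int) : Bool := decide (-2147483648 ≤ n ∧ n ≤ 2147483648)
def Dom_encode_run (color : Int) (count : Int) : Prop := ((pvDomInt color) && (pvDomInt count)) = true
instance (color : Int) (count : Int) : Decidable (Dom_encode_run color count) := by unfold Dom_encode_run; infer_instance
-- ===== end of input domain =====

-- B replaces A's chunk-by-chunk while-loop with a closed form: divmod(count,127) gives the
-- number of full chunks and the remainder directly (objective: simpler/faster, O(n/127) loop → arithmetic).

-- ===== PORT A =====
-- the while-loop of A, accumulator 'out'; terminates since count decreases by 127 while count > 127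
def encodeRunLoop (color : Int) (count : Int) (out : List Int) : List Int :=
  if _h : count > 127 then
    encodeRunLoop color (count - 127) (out ++ [Int.lor (Int.shiftLeft color 7) 127])
  else if count > 0 then out ++ [Int.lor (Int.shiftLeft color 7) count]
  else out
termination_by count.toNat
decreasing_by omega

def encode_run (color : Int) (count : Int) : List Int :=
  encodeRunLoop color count []

-- ===== PORT B =====
def encode_run_alt (color : Int) (count : Int) : List Int :=
  if count ≤ 0 then []
  else
    let q := PySem.Int.floordiv count 127   -- q, r = divmod(count, 127)
    let r := PySem.Int.mod count 127
    let full := Int.lor (Int.shiftLeft color 7) 127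
    let out := List.replicate q.toNat full  -- [full] * q  (q ≥ 0 here)
    if r > 0 then out ++ [Int.lor (Int.shiftLeft color 7) r] else out

-- ===== PRECONDITION & SPEC =====
def Spec_encode_run (color : Int) (count : Int) (out : List Int) : Prop := out = encode_run_alt color count
instance (color : Int) (count : Int) (out : List Int) : Decidable (Spec_encode_run color count out) := by unfold Spec_encode_run; infer_instance

-- ===== CLAIM (what is proved, stated in full; the proofs are below) =====
def Claim_equal_encode_run : Prop := ∀ (color : Int) (count : Int), Dom_encode_run color count → Spec_encode_run color count (encode_run color count)

-- ===== LEMMAS AND PROOFS =====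

theorem encodeRunLoop_eq_alt (color : Int) : ∀ (n : Nat) (count : Int), count.toNat ≤ n →
    ∀ (out : List Int), encodeRunLoop color count out = out ++ encode_run_alt color count := by
  intro n
  induction n with
  | zero =>
    intro count hle out
    have hc : count ≤ 0 := by omega
    rw [encodeRunLoop, encode_run_alt]
    simp [show ¬ count > 127 by omega, show ¬ count > 0 by omega, hc]
  | succ n ih =>
    intro count hle out
    by_cases h : count > 127
    · rw [encodeRunLoop]
      simp only [h, dite_true]
      rw [ih (count - 127) (by omega)]
      -- alt count = full :: alt (count - 127)
      have hq : PySem.Int.floordiv count 127 = PySem.Int.floordiv (count - 127) 127 + 1 := by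
        rw [PySem.Int.floordiv_eq_ediv_of_pos (by omega : (0:Int) < 127),
            PySem.Int.floordiv_eq_ediv_of_pos (by omega : (0:Int) < 127)]
        omega
      have hr : PySem.Int.mod count 127 = PySem.Int.mod (count - 127) 127 := by
        rw [PySem.Int.mod_eq_emod_of_pos (by omega : (0:Int) < 127),
            PySem.Int.mod_eq_emod_of_pos (by omega : (0:Int) < 127)]
        omega
      have hq0 : 0 ≤ PySem.Int.floordiv (count - 127) 127 := by
        rw [PySem.Int.floordiv_eq_ediv_of_pos (by omega : (0:Int) < 127)]
        exact Int.ediv_nonneg (by omega) (by omega)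
      conv_rhs => rw [encode_run_alt]
      rw [encode_run_alt]
      simp only [show ¬ count ≤ 0 by omega, show ¬ count - 127 ≤ 0 by omega,
        ite_false, hq, hr]
      have htn : (PySem.Int.floordiv (count - 127) 127 + 1).toNat
          = (PySem.Int.floordiv (count - 127) 127).toNat + 1 := by omega
      rw [htn, List.replicate_succ]
      split_ifs <;> simp
    · rw [encodeRunLoop]
      simp only [h, dite_false]
      rw [encode_run_alt]
      by_cases hp : count > 0
      · have hq : PySem.Int.floordiv count 127 = if count = 127 then 1 else 0 := by
          rw [PySem.Int.floordiv_eq_ediv_of_pos (by omega : (0:Int) < 127)]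
          split_ifs with h127 <;> omega
        have hr : PySem.Int.mod count 127 = if count = 127 then 0 else count := by
          rw [PySem.Int.mod_eq_emod_of_pos (by omega : (0:Int) < 127)]
          split_ifs with h127 <;> omega
        simp only [show ¬ count ≤ 0 by omega, hq, hr, hp, ite_true]
        by_cases h127 : count = 127
        · simp [h127]
        · simp [h127, hp]
      · simp [show count ≤ 0 by omega, show ¬ count > 0 from hp]

-- ===== VERDICT (by name: the statement is the Claim_ definition above) =====
theorem encode_run_spec : Claim_equal_encode_run := by
  intro color count _
  unfold Spec_encode_run encode_run
  simpa using encodeRunLoop_eq_alt color count.toNat count le_rfl []
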